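-- pv_equiv track=rewrite | github.com/zhuangjunyue/Deep-Learning-Network-for-Extracting-CO-from-PPG-Signals | PPG extract CO-checkpoint.py | calculate_S1
-- ===== SOURCE A (Python) =====
-- def calculate_S1(signal, peaks, troughs):
--     S1_areas = []
--     cycle_rectangles = []
--
--     # 遍历每对相邻的波谷，计算周期并框出矩形
--     for i in range(len(troughs) - 1):
--         cycle_start = troughs[i]
--         cycle_end = troughs[i + 1]
--         cycle_length = cycle_end - cycle_start  # 短边：波谷到波谷的距离
--
--         # 在这个周期内找到最高的波峰值
--         peaks_in_cycle = [peak for peak in peaks if cycle_start <= peak < cycle_end]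
--         if not peaks_in_cycle:  # 如果周期内没有波峰，则跳过
--             continue
--         max_peak = max(peaks_in_cycle, key=lambda peak: signal[peak])
--         amplitude = signal[max_peak] - signal[cycle_start]  # 长边：最大波峰与波谷的垂直距离
--
--         # 计算矩形面积
--         area = cycle_length * amplitude
--         S1_areas.append(area)
--
--         # 保存矩形的边界以便绘图
--         cycle_rectangles.append((cycle_start, cycle_end, signal[cycle_start], signal[max_peak]))
--
--     return S1_areas, cycle_rectangles
-- ===== SOURCE B (Python) =====
-- # First parameter named `sig` (same position/meaning as A's `signal`).
-- # B transposes A's loops: one pass over peaks maintains a per-interval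
-- # running-best table (argmax by signal value, first wins on ties), then a
-- # single emission pass over the table produces areas and rectangles.
-- def calculate_S1(sig, peaks, troughs):
--     intervals = list(zip(troughs, troughs[1:]))
--     best = [None] * len(intervals)
--     for p in peaks:
--         best = [p if (s <= p < e and (b is None or sig[p] > sig[b])) else b
--                 for b, (s, e) in zip(best, intervals)]
--     areas, rects = [], []
--     for b, (s, e) in zip(best, intervals):
--         if b is not None:
--             areas.append((e - s) * (sig[b] - sig[s]))
--             rects.append((s, e, sig[s], sig[b]))
--     return areas, rects
-- ===== Notes on version B (the rewrite author's own statement) =====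
-- stated objective: alternative
-- what changed: B transposes A's loops: instead of filtering and rescanning the whole peaks list once per trough interval (with max(key=...)), B makes a single pass over peaks that updates a per-interval running-best table (argmax by signal value, first occurrence wins), then a separate emission pass over the table builds areas and rectangles.
import Mathlib
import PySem

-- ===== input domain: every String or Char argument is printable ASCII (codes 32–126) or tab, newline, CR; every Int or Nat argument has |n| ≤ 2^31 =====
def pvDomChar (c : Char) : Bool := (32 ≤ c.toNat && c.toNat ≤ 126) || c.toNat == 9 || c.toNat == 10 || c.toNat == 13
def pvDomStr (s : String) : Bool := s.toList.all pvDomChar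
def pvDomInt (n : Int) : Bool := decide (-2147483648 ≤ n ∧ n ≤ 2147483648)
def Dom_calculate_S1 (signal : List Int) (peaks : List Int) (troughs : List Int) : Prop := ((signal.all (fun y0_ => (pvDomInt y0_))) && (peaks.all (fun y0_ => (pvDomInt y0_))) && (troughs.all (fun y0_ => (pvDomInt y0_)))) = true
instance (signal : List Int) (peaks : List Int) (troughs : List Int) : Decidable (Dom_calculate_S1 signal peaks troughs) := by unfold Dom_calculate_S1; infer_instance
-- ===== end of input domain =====

-- B transposes A's per-interval rescans of peaks into one pass over peaks updating a
-- per-interval running-best table plus an emission pass; equivalence is proved on all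
-- inputs where the Python A returns (Pre_ excludes exactly its IndexError cases).

-- ===== PORT A =====
-- signal[x] is ported as pyGetD signal x 0; exact under Pre_ (every such access is in range,
-- including Python's negative-index wraparound, which pyGetD reproduces).
def calculate_S1 (signal : List Int) (peaks : List Int) (troughs : List Int) : List Int × (List (Int × Int × Int × Int)) :=
  (PySem.List.pyRange 0 ((troughs.length : Int) - 1) 1).foldl
    (fun acc i =>
      let cycle_start := PySem.List.pyGetD troughs i 0
      let cycle_end := PySem.List.pyGetD troughs (i + 1) 0
      let cycle_length := cycle_end - cycle_start
      let peaks_in_cycle := peaks.filter (fun peak => decide (cycle_start ≤ peak ∧ peak < cycle_end))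
      match PySem.List.max? peaks_in_cycle (fun peak => PySem.List.pyGetD signal peak 0) with
      | none => acc  -- "if not peaks_in_cycle: continue"
      | some max_peak =>
        let amplitude := PySem.List.pyGetD signal max_peak 0 - PySem.List.pyGetD signal cycle_start 0
        let area := cycle_length * amplitude
        (acc.1 ++ [area],
         acc.2 ++ [(cycle_start, cycle_end, PySem.List.pyGetD signal cycle_start 0,
                    PySem.List.pyGetD signal max_peak 0)]))
    ([], [])

-- ===== PORT B =====
def calculate_S1_alt (signal : List Int) (peaks : List Int) (troughs : List Int) : List Int × (List (Int × Int × Int × Int)) :=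
  ((peaks.foldl
    (fun best p =>
      (best.zip (troughs.zip troughs.tail)).map (fun bse =>
        match bse.1 with
        | none => if bse.2.1 ≤ p ∧ p < bse.2.2 then some p else none
        | some q =>
          if bse.2.1 ≤ p ∧ p < bse.2.2 ∧
              PySem.List.pyGetD signal p 0 > PySem.List.pyGetD signal q 0
          then some p else some q))
    (List.replicate (troughs.zip troughs.tail).length (none : Option Int))).zip
      (troughs.zip troughs.tail)).foldl
    (fun acc bse =>
      match bse.1 with
      | none => acc
      | some b =>
        (acc.1 ++ [(bse.2.2 - bse.2.1) *
                   (PySem.List.pyGetD signal b 0 - PySem.List.pyGetD signal bse.2.1 0)],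
         acc.2 ++ [(bse.2.1, bse.2.2, PySem.List.pyGetD signal bse.2.1 0,
                    PySem.List.pyGetD signal b 0)]))
    ([], [])

-- ===== PRECONDITION & SPEC =====
-- Pre_ excludes exactly the inputs where the Python A raises IndexError: some trough interval
-- containing a peak starts at an out-of-range index, or contains an out-of-range peak.
def Pre_calculate_S1 (signal : List Int) (peaks : List Int) (troughs : List Int) : Prop :=
  ∀ se ∈ troughs.zip troughs.tail,
    (∃ p ∈ peaks, se.1 ≤ p ∧ p < se.2) →
    ((-(signal.length : Int) ≤ se.1 ∧ se.1 < (signal.length : Int)) ∧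
     ∀ p ∈ peaks, se.1 ≤ p ∧ p < se.2 → (-(signal.length : Int) ≤ p ∧ p < (signal.length : Int)))
instance (signal : List Int) (peaks : List Int) (troughs : List Int) : Decidable (Pre_calculate_S1 signal peaks troughs) := by unfold Pre_calculate_S1; infer_instance

def pvWitness_calculate_S1 : List Int × List Int × List Int := ([1, 5, 2, 6, 1], [1, 3], [0, 2, 4])

def Spec_calculate_S1 (signal : List Int) (peaks : List Int) (troughs : List Int) (out : List Int × (List (Int × Int × Int × Int))) : Prop := out = calculate_S1_alt signal peaks troughs
instance (signal : List Int) (peaks : List Int) (troughs : List Int) (out : List Int × (List (Int × Int × Int × Int))) : Decidable (Spec_calculate_S1 signal peaks troughs out) := by unfold Spec_calculate_S1; infer_instance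

-- ===== CLAIM (what is proved, stated in full; the proofs are below) =====
def Claim_equal_calculate_S1 : Prop := ∀ (signal : List Int) (peaks : List Int) (troughs : List Int), Dom_calculate_S1 signal peaks troughs → Pre_calculate_S1 signal peaks troughs → Spec_calculate_S1 signal peaks troughs (calculate_S1 signal peaks troughs)

-- ===== LEMMAS AND PROOFS =====

-- Zipping a mapped copy of a list with the list itself pairs each element with its image.
theorem pv_zip_map_self {α β : Type} (h : α → β) (L : List α) :
    (L.map h).zip L = L.map (fun x => (h x, x)) := by
  induction L with
  | nil => rfl
  | cons x L ih => simp [ih]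

-- B's table pass: after folding over all peaks, entry se of the table is the inner
-- accumulator fold over peaks for interval se.
theorem pv_table_eq (L : List (Int × Int)) (step : Int → Option Int × (Int × Int) → Option Int)
    (peaks : List Int) (h : (Int × Int) → Option Int) :
    peaks.foldl (fun best p => (best.zip L).map (fun bse => step p bse)) (L.map h)
    = L.map (fun se => peaks.foldl (fun b p => step p (b, se)) (h se)) := by
  induction peaks generalizing h with
  | nil => rfl
  | cons p ps ih =>
    simp only [List.foldl_cons]
    rw [pv_zip_map_self, List.map_map]
    exact ih (fun se => step p (h se, se))

-- B's per-peak update equals A's inner argmax combine (first maximal peak wins).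
theorem pv_step_eq (signal : List Int) (p : Int) (b : Option Int) (se : Int × Int) :
    (match b with
     | none => if se.1 ≤ p ∧ p < se.2 then some p else none
     | some q =>
       if se.1 ≤ p ∧ p < se.2 ∧
           PySem.List.pyGetD signal p 0 > PySem.List.pyGetD signal q 0
       then some p else some q)
    = (if se.1 ≤ p ∧ p < se.2 then
         match b with
         | none => some p
         | some q =>
           if PySem.List.pyGetD signal p 0 > PySem.List.pyGetD signal q 0 then some p else b
       else b) := by
  cases b with
  | none => by_cases h : se.1 ≤ p ∧ p < se.2 <;> simp [h]
  | some q =>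
    by_cases h : se.1 ≤ p ∧ p < se.2
    · by_cases hg : PySem.List.pyGetD signal p 0 > PySem.List.pyGetD signal q 0 <;>
        simp [h, hg]
    · have h2 : ¬(se.1 ≤ p ∧ p < se.2 ∧
          PySem.List.pyGetD signal p 0 > PySem.List.pyGetD signal q 0) :=
        fun hc => h ⟨hc.1, hc.2.1⟩
      simp [h, h2]

-- The accumulator fold over peaks equals A's max-by-signal over the filtered-in-interval peaks.
theorem pv_inner_eq (signal peaks : List Int) (s e : Int) :
    peaks.foldl
      (fun best p =>
        if s ≤ p ∧ p < e then
          match best with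
          | none => some p
          | some q =>
            if PySem.List.pyGetD signal p 0 > PySem.List.pyGetD signal q 0 then some p else best
        else best) none
    = PySem.List.max? (peaks.filter (fun peak => decide (s ≤ peak ∧ peak < e)))
        (fun peak => PySem.List.pyGetD signal peak 0) := by
  rw [PySem.List.max?, List.foldl_filter]
  congr 1
  funext acc p
  by_cases h : s ≤ p ∧ p < e
  · simp only [h]
    cases acc with
    | none => rfl
    | some q => rfl
  · simp [h]

-- The index loop of A visits exactly the consecutive trough pairs.
theorem pv_pairs_eq (troughs : List Int) :
    (PySem.List.pyRange 0 ((troughs.length : Int) - 1) 1).map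
      (fun i => (PySem.List.pyGetD troughs i 0, PySem.List.pyGetD troughs (i + 1) 0))
    = troughs.zip troughs.tail := by
  apply List.ext_getElem
  · simp only [List.length_map, PySem.List.length_pyRange_one, List.length_zip,
      List.length_tail]
    omega
  · intro k h1 h2
    have hk : k < troughs.length - 1 := by
      simpa [PySem.List.length_pyRange_one] using h1
    have hval : (PySem.List.pyRange 0 ((troughs.length : Int) - 1) 1)[k]'(by simpa [PySem.List.length_pyRange_one] using hk) = (k : Int) := by
      rw [PySem.List.getElem_pyRange_one]
      omega
    simp only [List.getElem_map, hval]
    have hgk : PySem.List.pyGetD troughs (k : Int) 0 = troughs[k]'(by omega) := by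
      rw [PySem.List.pyGetD_natCast]
      exact List.getD_eq_getElem _ _ _
    have hgk1 : PySem.List.pyGetD troughs ((k : Int) + 1) 0 = troughs[k + 1]'(by omega) := by
      have : ((k : Int) + 1) = ((k + 1 : Nat) : Int) := by push_cast; ring
      rw [this, PySem.List.pyGetD_natCast]
      exact List.getD_eq_getElem _ _ _
    rw [hgk, hgk1]
    have htail : troughs.tail[k]'(by simp [List.length_tail]; omega) = troughs[k + 1]'(by omega) := by
      simp [List.getElem_tail]
    simp [List.getElem_zip, htail]

-- ===== VERDICT (by name: the statement is the Claim_ definition above) =====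
theorem calculate_S1_spec : Claim_equal_calculate_S1 := by
  intro signal peaks troughs _ _
  unfold Spec_calculate_S1 calculate_S1 calculate_S1_alt
  -- rewrite B's table pass into a map of inner folds, then into A's per-interval argmax
  rw [show (List.replicate (troughs.zip troughs.tail).length (none : Option Int))
        = (troughs.zip troughs.tail).map (fun _ => (none : Option Int)) by
      simp [List.map_const', List.length_zip]]
  rw [pv_table_eq (troughs.zip troughs.tail)
      (fun p bse =>
        match bse.1 with
        | none => if bse.2.1 ≤ p ∧ p < bse.2.2 then some p else none
        | some q =>
          if bse.2.1 ≤ p ∧ p < bse.2.2 ∧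
              PySem.List.pyGetD signal p 0 > PySem.List.pyGetD signal q 0
          then some p else some q) peaks (fun _ => none)]
  simp only [pv_step_eq, pv_inner_eq]
  rw [pv_zip_map_self, List.foldl_map]
  -- rewrite A's index loop into the fold over consecutive trough pairs
  rw [← pv_pairs_eq troughs, List.foldl_map]
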